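-- pv_equiv track=rewrite | github.com/lbez0019/lb_uva_msc_thesis | act_parser.py | single_bracketed_token
-- ===== SOURCE A (Python) =====
-- def single_bracketed_token(expression):
--     result = ""
--     within_brackets = False
--
--     for char in expression:
--         if char == '(':
--             within_brackets = True
--         elif char == ')':
--             within_brackets = False
--
--         if within_brackets and char == ' ':
--             continue
--
--         result += char
--
--     return result
-- ===== SOURCE B (Python) =====
-- def single_bracketed_token(expression):
--     pre, sep, rest = expression.partition('(')
--     if not sep:
--         return pre
--     inside, sep2, rest2 = rest.partition(')')
--     if not sep2:
--         return pre + '(' + inside.replace(' ', '')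
--     return pre + '(' + inside.replace(' ', '') + ')' + single_bracketed_token(rest2)
-- ===== Notes on version B (the rewrite author's own statement) =====
-- stated objective: faster
-- what changed: Replaces the per-character loop with a boolean in-brackets flag by segment-based recursion: partition at '(' and the next ')', strip spaces from the bracketed segment wholesale with str.replace, recurse on the remainder; same O(n) asymptotics but C-level string primitives per segment instead of Python-level per-character work.
import Mathlib
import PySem

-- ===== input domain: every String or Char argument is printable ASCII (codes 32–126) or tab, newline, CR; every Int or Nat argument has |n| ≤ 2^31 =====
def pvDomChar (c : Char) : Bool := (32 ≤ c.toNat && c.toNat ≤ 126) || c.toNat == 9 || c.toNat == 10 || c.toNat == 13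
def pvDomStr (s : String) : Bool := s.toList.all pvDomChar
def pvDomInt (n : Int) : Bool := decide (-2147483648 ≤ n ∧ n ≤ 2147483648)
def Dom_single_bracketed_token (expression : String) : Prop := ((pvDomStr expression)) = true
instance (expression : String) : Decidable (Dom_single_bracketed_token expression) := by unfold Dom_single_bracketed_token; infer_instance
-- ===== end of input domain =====

-- B replaces A's per-character loop with a flag by segment-based recursion (partition at '(' and ')'); alternative decomposition, same cost.

-- ===== PORT A =====
-- A: for-loop over chars keeping (result, within_brackets); skip ' ' while within brackets.
def single_bracketed_token (expression : String) : String :=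
  let st := expression.toList.foldl
    (fun (st : List Char × Bool) c =>
      let wb := if c = '(' then true else if c = ')' then false else st.2
      if wb && c = ' ' then (st.1, wb) else (st.1 ++ [c], wb))
    ([], false)
  String.mk st.1

-- ===== PORT B =====
-- B: partition at the first '(', strip spaces up to the matching first ')', recurse on the rest.
def single_bracketed_token_go (l : List Char) : List Char :=
  let pre := l.takeWhile (· ≠ '(')
  match h : l.dropWhile (· ≠ '(') with
  | [] => pre
  | _ :: rest =>
    let inside := rest.takeWhile (· ≠ ')')
    match h2 : rest.dropWhile (· ≠ ')') with
    | [] => pre ++ '(' :: inside.filter (· ≠ ' ')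
    | _ :: rest2 => pre ++ '(' :: inside.filter (· ≠ ' ') ++ ')' :: single_bracketed_token_go rest2
termination_by l.length
decreasing_by
  have h1 : (l.dropWhile (· ≠ '(')).length ≤ l.length := List.length_dropWhile_le _ _
  have h3 : (rest.dropWhile (· ≠ ')')).length ≤ rest.length := List.length_dropWhile_le _ _
  simp only [h, h2] at h1 h3
  simp at h1 h3 ⊢
  omega

def single_bracketed_token_alt (expression : String) : String :=
  String.mk (single_bracketed_token_go expression.toList)

-- ===== PRECONDITION & SPEC =====
def Spec_single_bracketed_token (expression : String) (out : String) : Prop := out = single_bracketed_token_alt expression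
instance (expression : String) (out : String) : Decidable (Spec_single_bracketed_token expression out) := by unfold Spec_single_bracketed_token; infer_instance

-- ===== CLAIM (what is proved, stated in full; the proofs are below) =====
def Claim_equal_single_bracketed_token : Prop := ∀ (expression : String), Dom_single_bracketed_token expression → Spec_single_bracketed_token expression (single_bracketed_token expression)

-- ===== LEMMAS AND PROOFS =====

-- A's loop, written as structural recursion on the remaining characters.
def aGo : List Char → Bool → List Char
  | [], _ => []
  | c :: cs, wb =>
    let wb' := if c = '(' then true else if c = ')' then false else wb
    if wb' && c = ' ' then aGo cs wb' else c :: aGo cs wb'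

theorem foldl_eq_aGo (l : List Char) (acc : List Char) (wb : Bool) :
    (l.foldl (fun (st : List Char × Bool) c =>
      let wb := if c = '(' then true else if c = ')' then false else st.2
      if wb && c = ' ' then (st.1, wb) else (st.1 ++ [c], wb)) (acc, wb)).1
    = acc ++ aGo l wb := by
  induction l generalizing acc wb with
  | nil => simp [aGo]
  | cons c cs ih =>
    simp only [List.foldl_cons, aGo]
    by_cases hcond : ((if c = '(' then true else if c = ')' then false else wb) && decide (c = ' ')) = true
    · rw [if_pos hcond, if_pos hcond, ih]
    · rw [if_neg hcond, if_neg hcond, ih]; simp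

-- aGo outside brackets, up to the first '('.
theorem aGo_false (l : List Char) :
    aGo l false = l.takeWhile (· ≠ '(') ++
      (match l.dropWhile (· ≠ '(') with
       | [] => []
       | _ :: rest => '(' :: aGo rest true) := by
  induction l with
  | nil => simp [aGo]
  | cons c cs ih =>
    by_cases hc : c = '('
    · subst hc
      simp [aGo, List.takeWhile, List.dropWhile]
    · have hsp : ¬ (c = ' ' ∧ c = '(') := by rintro ⟨h1, h2⟩; exact hc h2
      simp only [aGo]
      by_cases hr : c = ')'
      · subst hr
        simp [List.takeWhile, List.dropWhile, ih]
      · simp only [if_neg hc, if_neg hr]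
        simp only [List.takeWhile, List.dropWhile]
        have : (c = '(') = False := by simp [hc]
        simp [hc, ih]

-- aGo inside brackets, up to the first ')'.
theorem aGo_true (l : List Char) :
    aGo l true = (l.takeWhile (· ≠ ')')).filter (· ≠ ' ') ++
      (match l.dropWhile (· ≠ ')') with
       | [] => []
       | _ :: rest => ')' :: aGo rest false) := by
  induction l with
  | nil => simp [aGo]
  | cons c cs ih =>
    by_cases hr : c = ')'
    · subst hr
      simp [aGo, List.takeWhile, List.dropWhile]
    · simp only [aGo]
      have hwb : (if c = '(' then true else if c = ')' then false else true) = true := by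
        by_cases hc : c = '(' <;> simp [hc, hr]
      rw [hwb]
      simp only [List.takeWhile, List.dropWhile]
      by_cases hs : c = ' '
      · subst hs
        simp [ih]
      · simp [hr, hs, ih]

theorem aGo_eq_go (l : List Char) : aGo l false = single_bracketed_token_go l := by
  induction hn : l.length using Nat.strong_induction_on generalizing l with
  | _ n ih =>
    subst hn
    rw [aGo_false, single_bracketed_token_go]
    cases h : l.dropWhile (· ≠ '(') with
    | nil => simp
    | cons x rest =>
      simp only
      rw [aGo_true]
      cases h2 : rest.dropWhile (· ≠ ')') with
      | nil => simp
      | cons y rest2 =>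
        have h1 : (l.dropWhile (· ≠ '(')).length ≤ l.length := List.length_dropWhile_le _ _
        have h3 : (rest.dropWhile (· ≠ ')')).length ≤ rest.length := List.length_dropWhile_le _ _
        rw [h] at h1; rw [h2] at h3
        simp only [List.length_cons] at h1 h3
        simp only
        rw [ih rest2.length (by omega) rest2 rfl]
        simp

-- ===== VERDICT (by name: the statement is the Claim_ definition above) =====
theorem single_bracketed_token_spec : Claim_equal_single_bracketed_token := by
  intro e _
  show _ = _
  unfold single_bracketed_token single_bracketed_token_alt
  dsimp only
  rw [foldl_eq_aGo, aGo_eq_go]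
  simp
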